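-- pv_equiv track=rewrite | github.com/AbstractEndeavors/contract-Deployer | functions_group.py | is_list_obj_in_str
-- ===== SOURCE A (Python) =====
-- def is_list_obj_in_str(string, list_obj):
--     """
--     Checks if the objects in the list 'list_obj' are in the string. If an object is found and is not in the 'found_list', it is added to 'found_list'.
--     """
--     found_list = []
--     for obj in list_obj:
--         if obj in string and obj not in found_list:
--             # Check if this obj is a substring of any already found items
--             if any(obj in found_obj for found_obj in found_list):
--                 continue
--             # Check if any already found items are substrings of this obj
--             found_list = [
--                 found_obj for found_obj in found_list if found_obj not in obj]
--             found_list.append(obj)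
--     return found_list
-- ===== SOURCE B (Python) =====
-- def is_list_obj_in_str(string, list_obj):
--     """Same result as A: two phases — collect present candidates (dedup, first
--     occurrence), then keep only those not strictly contained in another candidate."""
--     candidates = []
--     for obj in list_obj:
--         if obj in string and obj not in candidates:
--             candidates.append(obj)
--     return [obj for obj in candidates
--             if not any(obj != other and obj in other for other in candidates)]
-- ===== Notes on version B (the rewrite author's own statement) =====
-- stated objective: simpler
-- what changed: A maintains found_list incrementally in one pass (skipping dominated items and evicting found substrings of each new item); B decomposes the task into two phases: first collect the present candidates deduplicated in first-occurrence order, then keep exactly the candidates not strictly contained in another candidate.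
import Mathlib
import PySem

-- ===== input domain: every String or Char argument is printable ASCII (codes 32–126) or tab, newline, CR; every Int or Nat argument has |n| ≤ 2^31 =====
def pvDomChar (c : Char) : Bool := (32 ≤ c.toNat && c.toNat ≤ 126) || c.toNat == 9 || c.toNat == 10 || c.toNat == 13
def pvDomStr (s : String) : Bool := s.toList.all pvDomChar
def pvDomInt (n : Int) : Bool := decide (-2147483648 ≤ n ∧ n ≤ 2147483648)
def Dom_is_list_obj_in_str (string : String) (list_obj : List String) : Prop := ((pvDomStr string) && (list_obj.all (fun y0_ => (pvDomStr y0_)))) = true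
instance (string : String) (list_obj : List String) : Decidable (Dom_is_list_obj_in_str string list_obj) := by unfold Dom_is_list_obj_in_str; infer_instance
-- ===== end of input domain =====

-- B is a simpler two-phase decomposition of A's single incremental pass: collect present
-- candidates first, then filter the maximal ones; same result proved for all inputs (A is total).

-- ===== PORT A =====
-- A's loop body: add obj unless it is a substring of a found item; drop found substrings of obj.
def pvAStep (string : String) (found : List String) (obj : String) : List String :=
  if PySem.Str.isIn obj string && !(found.contains obj) then
    if found.any (fun found_obj => PySem.Str.isIn obj found_obj) then found
    else (found.filter (fun found_obj => !(PySem.Str.isIn found_obj obj))) ++ [obj]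
  else found

def is_list_obj_in_str (string : String) (list_obj : List String) : List String :=
  list_obj.foldl (pvAStep string) []

-- ===== PORT B =====
-- B phase 1: candidates present in `string`, deduplicated keeping first occurrence.
def pvBStep (string : String) (candidates : List String) (obj : String) : List String :=
  if PySem.Str.isIn obj string && !(candidates.contains obj) then candidates ++ [obj]
  else candidates

def is_list_obj_in_str_alt (string : String) (list_obj : List String) : List String :=
  let candidates := list_obj.foldl (pvBStep string) []
  candidates.filter (fun obj =>
    !(candidates.any (fun other => obj != other && PySem.Str.isIn obj other)))

-- ===== PRECONDITION & SPEC =====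
def Spec_is_list_obj_in_str (string : String) (list_obj : List String) (out : List String) : Prop := out = is_list_obj_in_str_alt string list_obj
instance (string : String) (list_obj : List String) (out : List String) : Decidable (Spec_is_list_obj_in_str string list_obj out) := by unfold Spec_is_list_obj_in_str; infer_instance

-- ===== CLAIM (what is proved, stated in full; the proofs are below) =====
def Claim_equal_is_list_obj_in_str : Prop := ∀ (string : String) (list_obj : List String), Dom_is_list_obj_in_str string list_obj → Spec_is_list_obj_in_str string list_obj (is_list_obj_in_str string list_obj)

-- ===== LEMMAS AND PROOFS =====

-- B's phase-2 filter: the candidates not strictly contained in another candidate.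
def pvMax (cs : List String) : List String :=
  cs.filter (fun obj => !(cs.any (fun other => obj != other && PySem.Str.isIn obj other)))

theorem pv_isIn_refl (a : String) : PySem.Chars.isIn a.toList a.toList = true := by
  rw [PySem.Chars.isIn_iff_infix]

theorem pv_isIn_trans {a b c : String} (h1 : PySem.Chars.isIn a.toList b.toList = true)
    (h2 : PySem.Chars.isIn b.toList c.toList = true) :
    PySem.Chars.isIn a.toList c.toList = true := by
  rw [PySem.Chars.isIn_iff_infix] at *; exact List.IsInfix.trans h1 h2

theorem pv_isIn_antisymm {a b : String} (h1 : PySem.Chars.isIn a.toList b.toList = true)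
    (h2 : PySem.Chars.isIn b.toList a.toList = true) : a = b := by
  rw [PySem.Chars.isIn_iff_infix] at h1 h2
  exact String.toList_inj.mp (List.IsInfix.eq_of_length h1
    (le_antisymm (List.IsInfix.length_le h1) (List.IsInfix.length_le h2)))

theorem pv_isIn_strict_len {a b : String} (h1 : PySem.Chars.isIn a.toList b.toList = true)
    (hne : a ≠ b) : a.toList.length < b.toList.length := by
  rw [PySem.Chars.isIn_iff_infix] at h1
  rcases lt_or_eq_of_le (List.IsInfix.length_le h1) with h | h
  · exact h
  · exact absurd (String.toList_inj.mp (List.IsInfix.eq_of_length h1 h)) hne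

theorem pv_mem_max {cs : List String} {x : String} :
    x ∈ pvMax cs ↔ x ∈ cs ∧ ∀ t ∈ cs, ¬x = t → PySem.Chars.isIn x.toList t.toList = false := by
  simp [pvMax]

-- every element of cs is a substring of some maximal element of cs
theorem pv_below_max_aux : ∀ (fuel : Nat) (cs : List String) (x : String), x ∈ cs →
    (∀ y ∈ cs, y.toList.length < x.toList.length + fuel) →
    ∃ m ∈ pvMax cs, PySem.Chars.isIn x.toList m.toList = true := by
  intro fuel
  induction fuel with
  | zero => intro cs x hx hb; exact absurd (hb x hx) (by omega)
  | succ n ih =>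
    intro cs x hx hb
    by_cases hmax : ∀ t ∈ cs, ¬x = t → PySem.Chars.isIn x.toList t.toList = false
    · exact ⟨x, pv_mem_max.mpr ⟨hx, hmax⟩, pv_isIn_refl x⟩
    · push_neg at hmax
      obtain ⟨t, ht, hne, hsub⟩ := hmax
      have hsub : PySem.Chars.isIn x.toList t.toList = true := eq_true_of_ne_false hsub
      have hlt := pv_isIn_strict_len hsub hne
      obtain ⟨m, hm, hsm⟩ := ih cs t ht (fun y hy => by have := hb y hy; omega)
      exact ⟨m, hm, pv_isIn_trans hsub hsm⟩

theorem pv_below_max {cs : List String} {x : String} (hx : x ∈ cs) :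
    ∃ m ∈ pvMax cs, PySem.Chars.isIn x.toList m.toList = true := by
  refine pv_below_max_aux ((cs.map (fun y => y.toList.length)).sum + 1) cs x hx ?_
  intro y hy
  have : y.toList.length ≤ (cs.map (fun y => y.toList.length)).sum :=
    List.le_sum_of_mem (List.mem_map_of_mem hy)
  omega

-- appending a dominated new element does not change the maximal set
theorem pv_dom_ext (cs : List String) (obj f : String) (hf : f ∈ pvMax cs)
    (hsubf : PySem.Chars.isIn obj.toList f.toList = true) (hmem : obj ∉ cs) :
    pvMax (cs ++ [obj]) = pvMax cs := by
  have hfcs : f ∈ cs := (pv_mem_max.mp hf).1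
  have hne : obj ≠ f := fun h => hmem (h ▸ hfcs)
  unfold pvMax
  rw [List.filter_append]
  have h1 : List.filter
      (fun o => !((cs ++ [obj]).any fun t => o != t && PySem.Str.isIn o t)) [obj] = [] := by
    rw [List.filter_eq_nil_iff]
    intro a ha
    rw [List.mem_singleton] at ha
    subst ha
    simp only [Bool.not_eq_eq_eq_not, Bool.not_true, List.any_eq_false, Bool.and_eq_true,
      bne_iff_ne, ne_eq, not_and, Bool.not_eq_true, PySem.Str.isIn_eq]
    intro h
    exact absurd (h f (List.mem_append_left _ hfcs) hne) (by simp [hsubf])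
  rw [h1, List.append_nil]
  apply List.filter_congr
  intro c hc
  rw [Bool.eq_iff_iff]
  simp only [Bool.not_eq_eq_eq_not, Bool.not_true, List.any_eq_false, Bool.and_eq_true,
    bne_iff_ne, ne_eq, not_and, Bool.not_eq_true, PySem.Str.isIn_eq]
  constructor
  · intro h t ht; exact h t (List.mem_append_left _ ht)
  · intro h t ht hct
    rcases List.mem_append.mp ht with ht | ht
    · exact h t ht hct
    · rw [List.mem_singleton] at ht
      subst ht
      by_contra hco
      have hco : PySem.Chars.isIn c.toList t.toList = true := eq_true_of_ne_false hco
      have hcf : PySem.Chars.isIn c.toList f.toList = true := pv_isIn_trans hco hsubf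
      have hcnef : ¬c = f := by
        intro h'; subst h'
        exact hne (pv_isIn_antisymm hsubf hco)
      exact absurd (h f hfcs hcnef) (by simp [hcf])

-- appending a new maximal element removes its substrings and appends it
theorem pv_max_ext (cs : List String) (obj : String) (hmem : obj ∉ cs)
    (hnosub : ∀ t ∈ cs, PySem.Chars.isIn obj.toList t.toList = false) :
    pvMax (cs ++ [obj]) =
      List.filter (fun f => !PySem.Chars.isIn f.toList obj.toList) (pvMax cs) ++ [obj] := by
  unfold pvMax
  rw [List.filter_append]
  have h1 : List.filter
      (fun o => !((cs ++ [obj]).any fun t => o != t && PySem.Str.isIn o t)) [obj] = [obj] := by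
    rw [List.filter_eq_self]
    intro a ha
    rw [List.mem_singleton] at ha
    subst ha
    simp only [Bool.not_eq_eq_eq_not, Bool.not_true, List.any_eq_false, Bool.and_eq_true,
      bne_iff_ne, ne_eq, not_and, Bool.not_eq_true, PySem.Str.isIn_eq]
    intro t ht hne
    rcases List.mem_append.mp ht with ht | ht
    · simp [hnosub t ht]
    · rw [List.mem_singleton] at ht; exact absurd ht.symm hne
  rw [h1, List.filter_filter]
  congr 1
  apply List.filter_congr
  intro c hc
  have hne : ¬c = obj := fun h => hmem (h ▸ hc)
  rw [Bool.eq_iff_iff]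
  simp only [Bool.not_eq_eq_eq_not, Bool.not_true, List.any_eq_false, Bool.and_eq_true,
    bne_iff_ne, ne_eq, not_and, Bool.not_eq_true, PySem.Str.isIn_eq]
  constructor
  · intro h
    refine ⟨?_, fun t ht hct => h t (List.mem_append_left _ ht) hct⟩
    simpa [hne] using h obj (List.mem_append_right _ (List.mem_singleton_self _)) hne
  · rintro ⟨hco, h⟩ t ht hct
    rcases List.mem_append.mp ht with ht | ht
    · exact h t ht hct
    · rw [List.mem_singleton] at ht; subst ht; exact hco

-- the main step lemma: A's loop step on the maximal set = maximality after B's step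
theorem pv_step_eq (string obj : String) (cs : List String) :
    pvAStep string (pvMax cs) obj = pvMax (pvBStep string cs obj) := by
  by_cases hin : PySem.Chars.isIn obj.toList string.toList = true
  · by_cases hmem : obj ∈ cs
    · have hb : pvBStep string cs obj = cs := by simp [pvBStep, hmem]
      rw [hb]
      by_cases hm : obj ∈ pvMax cs
      · simp [pvAStep, hm]
      · have hnm : ¬∀ t ∈ cs, ¬obj = t → PySem.Chars.isIn obj.toList t.toList = false :=
          fun h => hm (pv_mem_max.mpr ⟨hmem, h⟩)
        push_neg at hnm
        obtain ⟨t, ht, hne, hsub⟩ := hnm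
        have hsub : PySem.Chars.isIn obj.toList t.toList = true := eq_true_of_ne_false hsub
        obtain ⟨m, hmm, hsm⟩ := pv_below_max ht
        have hex : ∃ x ∈ pvMax cs, PySem.Chars.isIn obj.toList x.toList = true :=
          ⟨m, hmm, pv_isIn_trans hsub hsm⟩
        simp [pvAStep, hin, hm, hex]
    · have hb : pvBStep string cs obj = cs ++ [obj] := by simp [pvBStep, hin, hmem]
      rw [hb]
      have hm : obj ∉ pvMax cs := fun h => hmem (pv_mem_max.mp h).1
      by_cases hex : ∃ x ∈ pvMax cs, PySem.Chars.isIn obj.toList x.toList = true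
      · obtain ⟨f, hf, hsubf⟩ := hex
        have hA : pvAStep string (pvMax cs) obj = pvMax cs := by
          simp [pvAStep, hin, hm]
          intro h
          exact absurd (h f hf) (by simp [hsubf])
        rw [hA, pv_dom_ext cs obj f hf hsubf hmem]
      · have hnosub : ∀ t ∈ cs, PySem.Chars.isIn obj.toList t.toList = false := by
          intro t ht
          by_contra h
          have h : PySem.Chars.isIn obj.toList t.toList = true := eq_true_of_ne_false h
          obtain ⟨m, hmm, hsm⟩ := pv_below_max ht
          exact hex ⟨m, hmm, pv_isIn_trans h hsm⟩
        have hA : pvAStep string (pvMax cs) obj =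
            List.filter (fun f => !PySem.Chars.isIn f.toList obj.toList) (pvMax cs) ++ [obj] := by
          simp [pvAStep, hin, hm, hex]
        rw [hA, pv_max_ext cs obj hmem hnosub]
  · simp [pvAStep, pvBStep, hin]

-- loop invariant: A's fold is the maximal set of B's candidate fold
theorem pv_invariant (string : String) (p : List String) :
    p.foldl (pvAStep string) [] = pvMax (p.foldl (pvBStep string) []) := by
  induction p using List.reverseRecOn with
  | nil => rfl
  | append_singleton p x ih =>
    rw [List.foldl_append, List.foldl_append]
    simp only [List.foldl_cons, List.foldl_nil]
    rw [ih, pv_step_eq]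

-- ===== VERDICT (by name: the statement is the Claim_ definition above) =====
theorem is_list_obj_in_str_spec : Claim_equal_is_list_obj_in_str := by
  intro string list_obj _
  unfold Spec_is_list_obj_in_str is_list_obj_in_str is_list_obj_in_str_alt
  exact pv_invariant string list_obj
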